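-- pv_equiv track=rewrite | github.com/finitefield-org/mask-pii | python/src/mask_pii/masker.py | _mask_phone_candidate
-- ===== SOURCE A (Python) =====
-- def _mask_phone_candidate(candidate: str, mask_char: str) -> str:
--     digit_count = sum(1 for ch in candidate if _is_digit(ch))
--     current_index = 0
--     result_chars: list[str] = []
--
--     for ch in candidate:
--         if _is_digit(ch):
--             current_index += 1
--             if digit_count > 4 and current_index <= digit_count - 4:
--                 result_chars.append(mask_char)
--             else:
--                 result_chars.append(ch)
--         else:
--             result_chars.append(ch)
--
--     return "".join(result_chars)
--
-- def _is_digit(ch: str) -> bool: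
--     return "0" <= ch <= "9"
-- ===== SOURCE B (Python) =====
-- def _mask_phone_candidate(candidate: str, mask_char: str) -> str:
--     # Find the cut position: index of the 4th digit counted from the end.
--     cut = len(candidate)
--     kept = 0
--     while cut > 0 and kept < 4:
--         cut -= 1
--         if "0" <= candidate[cut] <= "9":
--             kept += 1
--     head = "".join(mask_char if "0" <= c <= "9" else c for c in candidate[:cut])
--     return head + candidate[cut:]
-- ===== Notes on version B (the rewrite author's own statement) =====
-- stated objective: alternative
-- what changed: Replaces A's digit-count pre-pass plus per-character index-threshold loop by a two-stage algorithm: a short backward scan finds the cut index of the 4th digit from the end, then the string is rebuilt as a masked prefix plus the unchanged suffix slice.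
import Mathlib
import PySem

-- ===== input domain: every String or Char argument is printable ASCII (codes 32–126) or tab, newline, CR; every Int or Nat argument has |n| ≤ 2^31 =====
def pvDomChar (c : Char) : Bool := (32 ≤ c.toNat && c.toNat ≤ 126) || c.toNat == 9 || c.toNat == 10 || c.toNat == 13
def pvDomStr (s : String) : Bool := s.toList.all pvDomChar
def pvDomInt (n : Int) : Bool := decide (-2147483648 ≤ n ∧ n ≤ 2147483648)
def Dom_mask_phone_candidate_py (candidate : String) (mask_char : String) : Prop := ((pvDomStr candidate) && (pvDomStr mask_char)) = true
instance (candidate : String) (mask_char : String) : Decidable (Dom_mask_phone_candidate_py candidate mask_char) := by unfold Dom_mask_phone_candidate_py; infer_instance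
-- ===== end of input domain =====

-- B replaces A's digit-count pre-pass + masking loop by a two-stage algorithm: first locate
-- the cut index of the 4th digit from the end, then mask every digit before it and keep the
-- rest verbatim (alternative decomposition, same cost).

-- ===== PORT A =====
-- _is_digit
def pvIsDig (ch : Char) : Bool := '0' ≤ ch && ch ≤ '9'

-- A's for-loop over candidate: builds the list of appended pieces (result_chars)
def pvMaskALoop (digit_count : Nat) (mask_char : String) : List Char → Nat → List String
  | [], _ => []
  | ch :: rest, current_index =>
    if pvIsDig ch then
      (if digit_count > 4 ∧ current_index + 1 ≤ digit_count - 4 then mask_char else String.ofList [ch])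
        :: pvMaskALoop digit_count mask_char rest (current_index + 1)
    else String.ofList [ch] :: pvMaskALoop digit_count mask_char rest current_index

def mask_phone_candidate_py (candidate : String) (mask_char : String) : String :=
  let digit_count := (candidate.toList.filter pvIsDig).length
  String.join (pvMaskALoop digit_count mask_char candidate.toList 0)

-- ===== PORT B =====
-- B's while loop: walks from the right end (here: down the reversed character list),
-- counting digits until 4 are seen; returns the final cut index (= chars not yet consumed).
def pvCutRev : List Char → Nat → Nat
  | [], _ => 0
  | ch :: rest, kept =>
    if 4 ≤ kept then rest.length + 1
    else pvCutRev rest (kept + if pvIsDig ch then 1 else 0)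

-- one element of B's head generator expression
def pvMaskPiece (mask_char : String) (ch : Char) : String :=
  if pvIsDig ch then mask_char else String.ofList [ch]

-- candidate[:cut] / candidate[cut:] with 0 ≤ cut ≤ len are exactly take/drop on the char list
def mask_phone_candidate_py_alt (candidate : String) (mask_char : String) : String :=
  let l := candidate.toList
  let cut := pvCutRev l.reverse 0
  String.join ((l.take cut).map (pvMaskPiece mask_char)) ++ String.ofList (l.drop cut)

-- ===== PRECONDITION & SPEC =====
def Spec_mask_phone_candidate_py (candidate : String) (mask_char : String) (out : String) : Prop := out = mask_phone_candidate_py_alt candidate mask_char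
instance (candidate : String) (mask_char : String) (out : String) : Decidable (Spec_mask_phone_candidate_py candidate mask_char out) := by unfold Spec_mask_phone_candidate_py; infer_instance

-- ===== CLAIM =====
def Claim_equal_mask_phone_candidate_py : Prop := ∀ (candidate : String) (mask_char : String), Dom_mask_phone_candidate_py candidate mask_char → Spec_mask_phone_candidate_py candidate mask_char (mask_phone_candidate_py candidate mask_char)

-- ===== LEMMAS AND PROOFS =====

def pvDCount (l : List Char) : Nat := (l.filter pvIsDig).length

theorem pvCutRev_le (rl : List Char) : ∀ k, pvCutRev rl k ≤ rl.length := by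
  induction rl with
  | nil => intro k; simp [pvCutRev]
  | cons ch rest ih =>
    intro k
    by_cases h : 4 ≤ k <;> simp [pvCutRev, h]
    exact Nat.le_succ_of_le (ih _)

theorem pvMaskALoop_append (t : Nat) (m : String) (l1 l2 : List Char) (idx : Nat) :
    pvMaskALoop t m (l1 ++ l2) idx = pvMaskALoop t m l1 idx ++ pvMaskALoop t m l2 (idx + pvDCount l1) := by
  induction l1 generalizing idx with
  | nil => simp [pvMaskALoop, pvDCount]
  | cons ch rest ih =>
    by_cases h : pvIsDig ch = true <;>
      simp [pvMaskALoop, pvDCount, h, ih, Nat.add_assoc, Nat.add_comm 1]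

theorem pvJoin_append (a b : List String) : String.join (a ++ b) = String.join a ++ String.join b := by
  rw [String.join_eq, String.join_eq, String.join_eq, List.map_append, List.flatten_append,
    String.ofList_append]

theorem pvMk_append (a b : List Char) : String.ofList (a ++ b) = String.ofList a ++ String.ofList b := String.ofList_append

-- when at least 4 digits lie to the right of the current point, A masks every digit
theorem pvMask_all (m : String) (l : List Char) :
    ∀ idx t, idx + pvDCount l + 4 ≤ t → pvMaskALoop t m l idx = l.map (pvMaskPiece m) := by
  induction l with
  | nil => intro idx t h; simp [pvMaskALoop]
  | cons ch rest ih =>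
    intro idx t h
    by_cases hd : pvIsDig ch = true
    · have hc : pvDCount (ch :: rest) = pvDCount rest + 1 := by simp [pvDCount, hd]
      rw [hc] at h
      have h4 : t > 4 ∧ idx + 1 ≤ t - 4 := by omega
      simp [pvMaskALoop, hd, h4, pvMaskPiece, ih (idx + 1) t (by omega)]
    · have hc : pvDCount (ch :: rest) = pvDCount rest := by simp [pvDCount, hd]
      rw [hc] at h
      simp [pvMaskALoop, hd, pvMaskPiece, ih idx t h]

-- core: A on l with total digit count pvDCount l + k equals B's cut-based assembly
-- started with kept = k on the reversed list
theorem pvMask_core (m : String) (l : List Char) :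
    ∀ k : Nat, String.join (pvMaskALoop (pvDCount l + k) m l 0)
      = String.join ((l.take (pvCutRev l.reverse k)).map (pvMaskPiece m))
        ++ String.ofList (l.drop (pvCutRev l.reverse k)) := by
  induction l using List.reverseRecOn with
  | nil => intro k; simp [pvMaskALoop, pvCutRev, String.join, String.ofList_nil]
  | append_singleton l' ch ih =>
    intro k
    by_cases hk : 4 ≤ k
    · have hcut : pvCutRev (l' ++ [ch]).reverse k = (l' ++ [ch]).length := by
        simp [pvCutRev, hk]
      rw [hcut, List.take_length, List.drop_length,
        pvMask_all m (l' ++ [ch]) 0 (pvDCount (l' ++ [ch]) + k) (by omega)]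
      simp
    · have hle : pvCutRev l'.reverse (k + if pvIsDig ch then 1 else 0) ≤ l'.length := by
        calc pvCutRev l'.reverse (k + if pvIsDig ch then 1 else 0) ≤ l'.reverse.length :=
              pvCutRev_le _ _
          _ = l'.length := by simp
      have hcut : pvCutRev (l' ++ [ch]).reverse k
          = pvCutRev l'.reverse (k + if pvIsDig ch then 1 else 0) := by
        simp [pvCutRev, hk]
      set c := pvCutRev l'.reverse (k + if pvIsDig ch then 1 else 0) with hc
      have htake : (l' ++ [ch]).take c = l'.take c := List.take_append_of_le_length hle
      have hdrop : (l' ++ [ch]).drop c = l'.drop c ++ [ch] := by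
        rw [List.drop_append_of_le_length hle]
      rw [hcut, htake, hdrop, pvMaskALoop_append, pvJoin_append, pvMk_append]
      by_cases hd : pvIsDig ch = true
      · have hdc : pvDCount (l' ++ [ch]) = pvDCount l' + 1 := by
          simp [pvDCount, List.filter_append, hd]
        have hpiece : pvMaskALoop (pvDCount (l' ++ [ch]) + k) m [ch] (0 + pvDCount l')
            = [String.ofList [ch]] := by
          rw [hdc]
          simp only [pvMaskALoop, hd, if_true]
          split_ifs with h
          · omega
          · rfl
        rw [hpiece, hdc]
        have := ih (k + 1)
        simp [hd] at hc
        rw [← hc] at this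
        rw [show pvDCount l' + 1 + k = pvDCount l' + (k + 1) by omega, this]
        simp [String.join, String.append_assoc]
      · have hdc : pvDCount (l' ++ [ch]) = pvDCount l' := by
          simp [pvDCount, List.filter_append, hd]
        have hpiece : pvMaskALoop (pvDCount (l' ++ [ch]) + k) m [ch] (0 + pvDCount l')
            = [String.ofList [ch]] := by simp [pvMaskALoop, hd]
        rw [hpiece, hdc]
        have := ih k
        simp [hd] at hc
        rw [← hc] at this
        rw [this]
        simp [String.join, String.append_assoc]

-- ===== VERDICT =====
theorem mask_phone_candidate_py_spec : Claim_equal_mask_phone_candidate_py := by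
  intro candidate mask_char _
  unfold Spec_mask_phone_candidate_py mask_phone_candidate_py mask_phone_candidate_py_alt
  have := pvMask_core mask_char candidate.toList 0
  simp [pvDCount] at this
  simp [this]
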